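-- pv_equiv track=rewrite | github.com/swemoney/AdventOfCode | 2025/05/day.py | run_part_2
-- ===== SOURCE A (Python) =====
-- def run_part_2(data):
--     fresh, _ = data
--     fresh.sort(key=lambda r: r[0])
--
--     total_fresh_ids = 0
--     max_fresh_id = -1
--     for fresh_range in fresh:
--         min_fresh_id = max(max_fresh_id + 1, fresh_range[0])
--         max_fresh_id = max(max_fresh_id, fresh_range[-1])
--         total_fresh_ids += max(0, max_fresh_id - min_fresh_id + 1)
--
--     return total_fresh_ids
-- ===== SOURCE B (Python) =====
-- def run_part_2(data):
--     fresh, _ = data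
--     fresh.sort(key=lambda r: r[0])
--
--     merged = []
--     cur_start, cur_end = 0, -1
--     for fresh_range in fresh:
--         start, end = fresh_range[0], fresh_range[-1]
--         if start <= cur_end:
--             cur_end = max(cur_end, end)
--         else:
--             merged.append((cur_start, cur_end))
--             cur_start, cur_end = start, end
--     merged.append((cur_start, cur_end))
--     return sum(max(0, e - s + 1) for s, e in merged)
-- ===== Notes on version B (the rewrite author's own statement) =====
-- stated objective: alternative
-- what changed: B replaces A's running max-id clamp (min_fresh_id = max(max_fresh_id+1, start) each step) with an interval-merge sweep: it folds the sorted ranges into a list of merged disjoint intervals and then sums max(0, end-start+1) over that list.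
import Mathlib
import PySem

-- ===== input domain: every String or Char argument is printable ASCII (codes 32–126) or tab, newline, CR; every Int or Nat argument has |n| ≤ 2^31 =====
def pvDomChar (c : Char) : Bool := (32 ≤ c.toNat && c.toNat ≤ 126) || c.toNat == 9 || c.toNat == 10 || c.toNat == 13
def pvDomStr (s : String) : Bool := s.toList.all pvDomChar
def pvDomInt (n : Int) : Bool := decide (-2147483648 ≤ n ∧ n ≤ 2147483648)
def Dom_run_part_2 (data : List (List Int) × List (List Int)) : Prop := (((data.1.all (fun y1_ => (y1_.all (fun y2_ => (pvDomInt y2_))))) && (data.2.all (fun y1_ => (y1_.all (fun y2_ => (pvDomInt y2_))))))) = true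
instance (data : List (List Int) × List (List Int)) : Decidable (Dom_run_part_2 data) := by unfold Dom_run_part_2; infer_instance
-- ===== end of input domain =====

-- B merges the sorted ranges into disjoint intervals and sums their sizes; A keeps a running
-- max-id clamp. Equivalence is about the return value; both sort data[0] in place identically.

-- r[0] (sort key and range start)
def pvStart (r : List Int) : Int := (PySem.List.pyGet? r 0).getD 0
-- r[-1] (range end)
def pvEnd (r : List Int) : Int := (PySem.List.pyGet? r (-1)).getD 0

-- ===== PORT A =====
def run_part_2 (data : List (List Int) × List (List Int)) : Int :=
  let fresh := PySem.List.sorted data.1 pvStart false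
  let st := fresh.foldl (fun (st : Int × Int) r =>
      let min_fresh := max (st.2 + 1) (pvStart r)
      let max_fresh := max st.2 (pvEnd r)
      (st.1 + max 0 (max_fresh - min_fresh + 1), max_fresh)) (0, -1)
  st.1

-- ===== PORT B =====
def run_part_2_alt (data : List (List Int) × List (List Int)) : Int :=
  let fresh := PySem.List.sorted data.1 pvStart false
  let st := fresh.foldl (fun (st : List (Int × Int) × Int × Int) r =>
      if pvStart r ≤ st.2.2 then (st.1, st.2.1, max st.2.2 (pvEnd r))
      else (st.1 ++ [(st.2.1, st.2.2)], pvStart r, pvEnd r)) ([], 0, -1)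
  ((st.1 ++ [(st.2.1, st.2.2)]).map (fun p => max 0 (p.2 - p.1 + 1))).sum

-- ===== PRECONDITION & SPEC =====
-- Pre_ excludes exactly the inputs where A raises IndexError: an empty list among the fresh ranges.
def Pre_run_part_2 (data : List (List Int) × List (List Int)) : Prop := ∀ r ∈ data.1, r ≠ []
instance (data : List (List Int) × List (List Int)) : Decidable (Pre_run_part_2 data) := by unfold Pre_run_part_2; infer_instance

def pvWitness_run_part_2 : (List (List Int) × List (List Int)) := ([[0, 2], [1, 3], [7, 7]], [])

def Spec_run_part_2 (data : List (List Int) × List (List Int)) (out : Int) : Prop := out = run_part_2_alt data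
instance (data : List (List Int) × List (List Int)) (out : Int) : Decidable (Spec_run_part_2 data out) := by unfold Spec_run_part_2; infer_instance

-- ===== CLAIM (what is proved, stated in full; the proofs are below) =====
def Claim_equal_run_part_2 : Prop := ∀ (data : List (List Int) × List (List Int)), Dom_run_part_2 data → Pre_run_part_2 data → Spec_run_part_2 data (run_part_2 data)

-- ===== LEMMAS AND PROOFS =====

-- Core invariant lemma: over any list of ranges whose starts are sorted, A's fold and B's fold
-- stay related by: A.total = sum over merged ++ [current] of interval sizes, together with the
-- bracketing of A's max_fresh_id by B's current interval.
theorem pv_core (L : List (List Int)) (total maxid : Int)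
    (merged : List (Int × Int)) (cs ce : Int)
    (hsort : L.Pairwise (fun a b => pvStart a ≤ pvStart b))
    (hI1 : total = ((merged).map (fun p => max 0 (p.2 - p.1 + 1))).sum + max 0 (ce - cs + 1))
    (hI2 : ce ≤ maxid)
    (hI3 : maxid ≤ max ce (cs - 1))
    (hI5 : ∀ r ∈ L, ce < pvStart r → cs ≤ pvStart r)
    (hI6 : cs - 1 ≤ ce ∨ ∀ r ∈ L, ce < pvStart r) :
    (L.foldl (fun (st : Int × Int) r =>
      let min_fresh := max (st.2 + 1) (pvStart r)
      let max_fresh := max st.2 (pvEnd r)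
      (st.1 + max 0 (max_fresh - min_fresh + 1), max_fresh)) (total, maxid)).1
    =
    (((L.foldl (fun (st : List (Int × Int) × Int × Int) r =>
      if pvStart r ≤ st.2.2 then (st.1, st.2.1, max st.2.2 (pvEnd r))
      else (st.1 ++ [(st.2.1, st.2.2)], pvStart r, pvEnd r)) (merged, cs, ce)).1
      ++ [((L.foldl (fun (st : List (Int × Int) × Int × Int) r =>
      if pvStart r ≤ st.2.2 then (st.1, st.2.1, max st.2.2 (pvEnd r))
      else (st.1 ++ [(st.2.1, st.2.2)], pvStart r, pvEnd r)) (merged, cs, ce)).2.1,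
          (L.foldl (fun (st : List (Int × Int) × Int × Int) r =>
      if pvStart r ≤ st.2.2 then (st.1, st.2.1, max st.2.2 (pvEnd r))
      else (st.1 ++ [(st.2.1, st.2.2)], pvStart r, pvEnd r)) (merged, cs, ce)).2.2)]).map
        (fun p => max 0 (p.2 - p.1 + 1))).sum := by
  induction L generalizing total maxid merged cs ce with
  | nil => simp [hI1]
  | cons r L ih =>
    rcases List.pairwise_cons.mp hsort with ⟨hr, hL⟩
    simp only [List.foldl_cons]
    by_cases hm : pvStart r ≤ ce
    · -- merge step
      have hcs : cs - 1 ≤ ce := by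
        rcases hI6 with h | h
        · exact h
        · exact absurd hm (not_le.mpr (h r (List.mem_cons_self)))
      have hmaxid : maxid = ce := by omega
      simp only [if_pos hm]
      apply ih _ _ _ _ _ hL
      · rw [hI1]; subst hmaxid; omega
      · omega
      · omega
      · intro x hx hlt
        exact hI5 x (List.mem_cons_of_mem _ hx) (by omega)
      · left; omega
    · -- push step
      have hcss : cs ≤ pvStart r := hI5 r (List.mem_cons_self) (by omega)
      have hmid : maxid ≤ pvStart r - 1 := by omega
      simp only [if_neg hm]
      rw [ih _ _ _ _ _ hL]
      · rw [hI1]; simp only [List.map_append, List.sum_append, List.map_cons,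
          List.map_nil, List.sum_cons, List.sum_nil]
        omega
      · omega
      · omega
      · intro x hx _
        exact hr x hx
      · by_cases hadj : pvStart r - 1 ≤ pvEnd r
        · left; exact hadj
        · right; intro x hx
          have := hr x hx; omega

-- ===== VERDICT (by name: the statement is the Claim_ definition above) =====
theorem run_part_2_spec : Claim_equal_run_part_2 := by
  intro data _ _
  unfold Spec_run_part_2 run_part_2 run_part_2_alt
  simp only []
  exact pv_core _ 0 (-1) [] 0 (-1)
    (PySem.List.sorted_pairwise _ _)
    (by simp) (le_refl _) (by omega)
    (fun r _ _ => by omega) (Or.inl (by omega))
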